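-- pv_equiv track=rewrite | github.com/Fakemrx/drf-dealership | celery_tasks/dealership_tasks.py | suitable_cars_list_filter
-- ===== SOURCE A (Python) =====
-- def suitable_cars_list_filter(
--     cars_suitable_by_specs,
--     num_of_specs,
-- ):
--     """
--     Filters only cars that match final search.
--     """
--     suitable_cars = []
--     for car in cars_suitable_by_specs:
--         if (
--             cars_suitable_by_specs.count(car) == num_of_specs
--             and car not in suitable_cars
--         ):
--             suitable_cars.append(car)
--             # Add every single car if it matches with all conditions
--     return suitable_cars
-- ===== SOURCE B (Python) =====
-- def suitable_cars_list_filter(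
--     cars_suitable_by_specs,
--     num_of_specs,
-- ):
--     """
--     Filters only cars that match final search.
--
--     One-pass frequency table; the table's keys (first-appearance order)
--     replace A's repeated .count scans and 'seen' membership test.
--     """
--     counts = {}
--     for car in cars_suitable_by_specs:
--         counts[car] = counts.get(car, 0) + 1
--     return [car for car, cnt in counts.items() if cnt == num_of_specs]
-- ===== Notes on version B (the rewrite author's own statement) =====
-- stated objective: faster
-- what changed: Replaces A's per-element full-list .count rescan plus 'not in result' dedup check with a single-pass frequency dict whose insertion-ordered keys are filtered once, removing both inner scans.
import Mathlib
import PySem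

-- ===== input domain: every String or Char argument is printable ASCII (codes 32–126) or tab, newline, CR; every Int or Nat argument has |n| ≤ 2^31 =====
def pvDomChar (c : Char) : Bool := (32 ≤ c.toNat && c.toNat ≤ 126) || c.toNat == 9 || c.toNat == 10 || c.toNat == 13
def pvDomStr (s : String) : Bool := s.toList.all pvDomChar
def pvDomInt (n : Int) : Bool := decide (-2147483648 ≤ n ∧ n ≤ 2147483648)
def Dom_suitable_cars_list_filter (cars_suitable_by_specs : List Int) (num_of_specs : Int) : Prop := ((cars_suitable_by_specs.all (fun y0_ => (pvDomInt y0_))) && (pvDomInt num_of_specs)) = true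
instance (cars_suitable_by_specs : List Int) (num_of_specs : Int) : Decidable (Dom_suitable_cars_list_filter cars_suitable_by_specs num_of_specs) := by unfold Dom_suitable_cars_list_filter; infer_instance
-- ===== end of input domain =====

-- B replaces A's per-element whole-list .count rescan and 'not in result' check by a
-- one-pass frequency dict whose insertion-ordered keys are filtered once (faster: O(n^2) -> O(n) scans in Python).


-- ===== PORT A =====
def suitable_cars_list_filter (cars_suitable_by_specs : List Int) (num_of_specs : Int) : List Int :=
  cars_suitable_by_specs.foldl
    (fun suitable_cars car =>
      if ((PySem.List.count cars_suitable_by_specs car : Int) == num_of_specs)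
          && !(suitable_cars.contains car)
      then suitable_cars ++ [car]
      else suitable_cars)
    []

-- ===== PORT B =====
def suitable_cars_list_filter_alt (cars_suitable_by_specs : List Int) (num_of_specs : Int) : List Int :=
  let counts : PySem.Dict Int Int :=
    cars_suitable_by_specs.foldl (fun d car => d.insert car (d.getD car 0 + 1)) PySem.Dict.empty
  (counts.items.filter (fun kv => kv.2 == num_of_specs)).map (·.1)

-- ===== PRECONDITION & SPEC =====
def Spec_suitable_cars_list_filter (cars_suitable_by_specs : List Int) (num_of_specs : Int) (out : List Int) : Prop := out = suitable_cars_list_filter_alt cars_suitable_by_specs num_of_specs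
instance (cars_suitable_by_specs : List Int) (num_of_specs : Int) (out : List Int) : Decidable (Spec_suitable_cars_list_filter cars_suitable_by_specs num_of_specs out) := by unfold Spec_suitable_cars_list_filter; infer_instance

-- ===== CLAIM (what is proved, stated in full; the proofs are below) =====
def Claim_equal_suitable_cars_list_filter : Prop := ∀ (cars_suitable_by_specs : List Int) (num_of_specs : Int), Dom_suitable_cars_list_filter cars_suitable_by_specs num_of_specs → Spec_suitable_cars_list_filter cars_suitable_by_specs num_of_specs (suitable_cars_list_filter cars_suitable_by_specs num_of_specs)

-- ===== LEMMAS AND PROOFS =====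

-- A's accumulate-if-new loop, for ANY fixed Bool predicate, is the filter of the
-- ordered set of the traversed list (the invariant of A's loop).
theorem loopA_eq_filter_ofList (p : Int → Bool) (xs : List Int) :
    xs.foldl (fun acc car => if p car && !(acc.contains car) then acc ++ [car] else acc) []
      = (PySem.Set.ofList xs).filter p := by
  induction xs using List.reverseRecOn with
  | nil => rfl
  | append_singleton ys x ih =>
    rw [List.foldl_append, ih, PySem.Set.ofList_append_singleton, PySem.Set.add_eq_ite]
    simp only [List.foldl_cons, List.foldl_nil]
    by_cases hmem : x ∈ PySem.Set.ofList ys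
    · have hc : ((PySem.Set.ofList ys).filter p).contains x = p x := by
        by_cases hp : p x = true
        · simp [List.mem_filter, hmem, hp]
        · simp [List.mem_filter, hp]
      rw [if_pos hmem, hc]
      by_cases hp : p x = true <;> simp [hp]
    · have hc : ((PySem.Set.ofList ys).filter p).contains x = false := by
        simp [List.mem_filter, hmem]
      rw [if_neg hmem, hc, List.filter_append]
      by_cases hp : p x = true <;> simp [hp]

theorem suitable_cars_list_filter_spec : Claim_equal_suitable_cars_list_filter := by
  intro xs n _
  show suitable_cars_list_filter xs n = suitable_cars_list_filter_alt xs n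
  unfold suitable_cars_list_filter suitable_cars_list_filter_alt
  simp only [PySem.Dict.foldl_insert_getD_add_one_eq_counter, PySem.Dict.items_counter,
    List.filter_map, List.map_map]
  rw [loopA_eq_filter_ofList (fun car => ((PySem.List.count xs car : Int) == n))]
  simp only [Function.comp_def, List.map_id_fun', id]
  rfl
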